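-- pv_equiv track=rewrite | github.com/NikolayL2sch/codeforces_tasks | 966_div.3/C_remake.py | find_equal_pairs
-- ===== SOURCE A (Python) =====
-- def find_equal_pairs(lst):
--     last_index = {}
--     pairs = []
--
--     for i, value in enumerate(lst):
--         if value in last_index:
--             pairs.append((last_index[value], i))
--         last_index[value] = i
--
--     return pairs
-- ===== SOURCE B (Python) =====
-- def find_equal_pairs(lst):
--     # Dict-free alternative: for each position scan backwards for the nearest
--     # earlier equal value; pairs come out ordered by second index automatically.
--     pairs = []
--     for i in range(len(lst)):
--         for j in range(i - 1, -1, -1):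
--             if lst[j] == lst[i]:
--                 pairs.append((j, i))
--                 break
--     return pairs
-- ===== Notes on version B (the rewrite author's own statement) =====
-- stated objective: alternative
-- what changed: Replaces A's single pass with a last-index dict by a dict-free nested backward scan: for each position, scan earlier positions right-to-left for the nearest equal value and emit that pair directly.
import Mathlib
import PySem

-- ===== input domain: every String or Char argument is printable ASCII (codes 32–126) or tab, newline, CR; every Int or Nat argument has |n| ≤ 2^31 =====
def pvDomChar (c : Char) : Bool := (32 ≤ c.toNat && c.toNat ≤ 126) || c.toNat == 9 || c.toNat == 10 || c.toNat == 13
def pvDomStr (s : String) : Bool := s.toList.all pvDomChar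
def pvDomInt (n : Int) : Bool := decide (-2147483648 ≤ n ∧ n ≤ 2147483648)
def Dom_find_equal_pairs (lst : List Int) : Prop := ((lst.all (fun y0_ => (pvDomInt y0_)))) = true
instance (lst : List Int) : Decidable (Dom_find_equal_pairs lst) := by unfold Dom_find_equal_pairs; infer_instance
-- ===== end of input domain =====

-- B replaces A's dict-of-last-indices single pass by a nested backward scan (alternative decomposition, not faster).

-- ===== PORT A =====
def find_equal_pairs (lst : List Int) : List (Int × Int) :=
  ((PySem.List.enumerate lst).foldl
    (fun (st : PySem.Dict Int Int × List (Int × Int)) p =>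
      (st.1.insert p.2 p.1,
       if st.1.contains p.2 then st.2 ++ [(st.1.getD p.2 0, p.1)] else st.2))
    (PySem.Dict.empty, [])).2

-- ===== PORT B =====
-- inner loop 'for j in range(i-1, -1, -1): if lst[j] == lst[i]: … break' — scans k-1, k-2, …, 0;
-- lst.getD j 0 is exact for lst[j] here since every scanned index satisfies 0 ≤ j < len(lst).
def scanBack (lst : List Int) (v : Int) : Nat → Option Int
  | 0 => none
  | k + 1 => if lst.getD k 0 = v then some (k : Int) else scanBack lst v k

def find_equal_pairs_alt (lst : List Int) : List (Int × Int) :=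
  (List.range lst.length).foldl
    (fun pairs i =>
      match scanBack lst (lst.getD i 0) i with
      | some j => pairs ++ [(j, (i : Int))]
      | none => pairs)
    []

-- ===== PRECONDITION & SPEC =====
def Spec_find_equal_pairs (lst : List Int) (out : List (Int × Int)) : Prop := out = find_equal_pairs_alt lst
instance (lst : List Int) (out : List (Int × Int)) : Decidable (Spec_find_equal_pairs lst out) := by unfold Spec_find_equal_pairs; infer_instance

-- ===== CLAIM (what is proved, stated in full; the proofs are below) =====
def Claim_equal_find_equal_pairs : Prop := ∀ (lst : List Int), Dom_find_equal_pairs lst → Spec_find_equal_pairs lst (find_equal_pairs lst)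

-- ===== LEMMAS AND PROOFS =====

-- A's full loop state (dict and pairs together), for the invariant proofs.
def aFold (lst : List Int) : PySem.Dict Int Int × List (Int × Int) :=
  (PySem.List.enumerate lst).foldl
    (fun (st : PySem.Dict Int Int × List (Int × Int)) p =>
      (st.1.insert p.2 p.1,
       if st.1.contains p.2 then st.2 ++ [(st.1.getD p.2 0, p.1)] else st.2))
    (PySem.Dict.empty, [])

theorem find_equal_pairs_eq_aFold (lst : List Int) : find_equal_pairs lst = (aFold lst).2 := rfl

theorem aFold_append (ys : List Int) (x : Int) :
    aFold (ys ++ [x]) =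
      ((aFold ys).1.insert x (ys.length : Int),
       if (aFold ys).1.contains x then
         (aFold ys).2 ++ [((aFold ys).1.getD x 0, (ys.length : Int))]
       else (aFold ys).2) := by
  simp [aFold, PySem.List.enumerate_append, PySem.List.enumerate_cons, PySem.List.enumerate_nil,
    List.foldl_append]

theorem scanBack_append_le (ys : List Int) (x v : Int) (k : Nat) (h : k ≤ ys.length) :
    scanBack (ys ++ [x]) v k = scanBack ys v k := by
  induction k with
  | zero => rfl
  | succ k ih =>
    have hk : k < ys.length := h
    simp only [scanBack, List.getD_append _ _ _ _ hk, ih (Nat.le_of_lt hk)]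

theorem getD_append_lt (ys : List Int) (x : Int) (i : Nat) (h : i < ys.length) :
    (ys ++ [x]).getD i 0 = ys.getD i 0 := List.getD_append _ _ _ _ h

theorem getD_append_self (ys : List Int) (x : Int) :
    (ys ++ [x]).getD ys.length 0 = x := by
  simp [List.getD]

-- A's dict after a prefix maps v to exactly what B's backward scan over that prefix finds.
theorem aFold_dict_get (ys : List Int) (v : Int) :
    (aFold ys).1.get? v = scanBack ys v ys.length := by
  induction ys using List.reverseRecOn with
  | nil => rfl
  | append_singleton ys x ih =>
    rw [aFold_append]
    simp only [List.length_append, List.length_singleton]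
    rw [PySem.Dict.get?_insert]
    have hx : (ys ++ [x]).getD ys.length 0 = x := getD_append_self ys x
    by_cases hv : v = x
    · subst hv
      simp [scanBack]
    · rw [if_neg hv]
      have : scanBack (ys ++ [x]) v (ys.length + 1)
          = scanBack (ys ++ [x]) v ys.length := by
        simp [scanBack, Ne.symm hv]
      rw [this, scanBack_append_le ys x v ys.length (Nat.le_refl _), ih]

theorem alt_append (ys : List Int) (x : Int) :
    find_equal_pairs_alt (ys ++ [x]) =
      match scanBack ys x ys.length with
      | some j => find_equal_pairs_alt ys ++ [(j, (ys.length : Int))]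
      | none => find_equal_pairs_alt ys := by
  unfold find_equal_pairs_alt
  rw [show (ys ++ [x]).length = ys.length + 1 by simp, List.range_succ, List.foldl_append]
  have hcongr : ∀ (acc : List (Int × Int)),
      (List.range ys.length).foldl
        (fun pairs i =>
          match scanBack (ys ++ [x]) ((ys ++ [x]).getD i 0) i with
          | some j => pairs ++ [(j, (i : Int))]
          | none => pairs) acc
      = (List.range ys.length).foldl
        (fun pairs i =>
          match scanBack ys (ys.getD i 0) i with
          | some j => pairs ++ [(j, (i : Int))]
          | none => pairs) acc := by
    intro acc
    apply PySem.List.foldl_congr_mem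
    intro b i hi
    have hlt : i < ys.length := List.mem_range.mp hi
    rw [getD_append_lt ys x i hlt, scanBack_append_le ys x _ i (Nat.le_of_lt hlt)]
  rw [hcongr]
  simp only [List.foldl_cons, List.foldl_nil,
    getD_append_self ys x, scanBack_append_le ys x x ys.length (Nat.le_refl _)]

theorem aFold_pairs_eq_alt (lst : List Int) : (aFold lst).2 = find_equal_pairs_alt lst := by
  induction lst using List.reverseRecOn with
  | nil => rfl
  | append_singleton ys x ih =>
    rw [aFold_append, alt_append, ← ih]
    have hget : (aFold ys).1.get? x = scanBack ys x ys.length := aFold_dict_get ys x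
    have hcont : (aFold ys).1.contains x = ((aFold ys).1.get? x).isSome :=
      PySem.Dict.contains_eq_isSome_get? _ _
    cases hs : scanBack ys x ys.length with
    | none => simp [hcont, hget, hs]
    | some j =>
      have : (aFold ys).1.getD x 0 = j := by
        rw [PySem.Dict.getD_eq_get?_getD, hget, hs]; rfl
      simp [hcont, hget, hs, this]

-- ===== VERDICT (by name: the statement is the Claim_ definition above) =====
theorem find_equal_pairs_spec : Claim_equal_find_equal_pairs := by
  intro lst _
  unfold Spec_find_equal_pairs
  rw [find_equal_pairs_eq_aFold, aFold_pairs_eq_alt]
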